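-- pv_equiv track=rewrite | github.com/harishartanto/information-retrieval | DatabaseSystem.py | get_result_order
-- ===== SOURCE A (Python) =====
-- def get_result_order(vsm, idteks):
--     '''Method untuk menampilkan hasil pencarian'''
--     order = sorted(range(len(vsm)), key=lambda order: vsm[order], reverse = True)
--     list_id_hasil = []
--     if vsm == []:
--         pass
--     else:
--         for d in order:
--             if vsm[d] > 0:
--                 list_id_hasil.append(idteks[d])
--
--     int_to_str_inlist = [str(integer) for integer in list_id_hasil]
--     full_str = ','.join(int_to_str_inlist)
--
--     return list_id_hasil, full_str
-- ===== SOURCE B (Python) =====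
-- def get_result_order(vsm, idteks):
--     '''Method untuk menampilkan hasil pencarian'''
--     buckets = {}
--     for d in range(len(vsm)):
--         if vsm[d] > 0:
--             buckets.setdefault(vsm[d], []).append(idteks[d])
--     list_id_hasil = []
--     for score in sorted(buckets, reverse=True):
--         list_id_hasil += buckets[score]
--     return list_id_hasil, ','.join(str(i) for i in list_id_hasil)
-- ===== Notes on version B (the rewrite author's own statement) =====
-- stated objective: alternative
-- what changed: B replaces A's stable sort of all indices followed by a filter with a grouping algorithm: one pass buckets the ids by score in a dict (only positive scores), then the distinct scores are sorted descending and the buckets concatenated; only the distinct scores are ever sorted, and stability is inherited from bucket order instead of the sort.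
import Mathlib
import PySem

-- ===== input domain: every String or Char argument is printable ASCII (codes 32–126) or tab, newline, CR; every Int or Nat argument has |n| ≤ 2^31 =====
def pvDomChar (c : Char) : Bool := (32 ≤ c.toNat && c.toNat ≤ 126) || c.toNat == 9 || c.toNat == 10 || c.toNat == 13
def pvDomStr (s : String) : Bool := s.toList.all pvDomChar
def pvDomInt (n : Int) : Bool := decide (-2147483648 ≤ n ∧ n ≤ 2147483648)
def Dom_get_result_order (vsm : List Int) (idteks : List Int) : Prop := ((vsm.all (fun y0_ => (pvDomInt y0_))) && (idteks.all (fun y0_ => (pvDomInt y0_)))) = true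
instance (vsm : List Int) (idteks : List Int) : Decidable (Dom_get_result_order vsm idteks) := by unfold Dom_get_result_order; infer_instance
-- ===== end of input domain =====

-- B groups ids into score buckets with a dict in one pass and concatenates the buckets in
-- descending order of the (sorted) distinct scores, replacing A's stable sort of all indices
-- followed by a filter (alternative algorithm: grouping instead of sorting the whole list).


-- ===== PORT A =====
def get_result_order (vsm : List Int) (idteks : List Int) : List Int × String :=
  let order := PySem.List.sorted (PySem.List.pyRange 0 (PySem.List.len vsm) 1)
      (fun d => PySem.List.pyGetD vsm d 0) true
  let list_id_hasil :=
    if vsm = [] then ([] : List Int)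
    else order.foldl
      (fun acc d => if 0 < PySem.List.pyGetD vsm d 0 then acc ++ [PySem.List.pyGetD idteks d 0] else acc) []
  let int_to_str_inlist := list_id_hasil.map PySem.Int.toStr
  (list_id_hasil, PySem.Str.join "," int_to_str_inlist)

-- ===== PORT B =====
def get_result_order_alt (vsm : List Int) (idteks : List Int) : List Int × String :=
  let buckets := (PySem.List.pyRange 0 (PySem.List.len vsm) 1).foldl
      (fun b d => if 0 < PySem.List.pyGetD vsm d 0
        then b.modify (PySem.List.pyGetD vsm d 0) [] (· ++ [PySem.List.pyGetD idteks d 0])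
        else b) (PySem.Dict.empty : PySem.Dict Int (List Int))
  let list_id_hasil := (PySem.List.sorted buckets.keys (fun v => v) true).foldl
      (fun acc v => acc ++ buckets.getD v []) []
  (list_id_hasil, PySem.Str.join "," (list_id_hasil.map PySem.Int.toStr))

-- ===== PRECONDITION & SPEC =====
-- Pre_ excludes exactly the inputs where the Python A raises IndexError: a positive score at an
-- index with no corresponding id in idteks (the Python B raises IndexError there too).
def Pre_get_result_order (vsm : List Int) (idteks : List Int) : Prop :=
  ∀ i : Nat, i < vsm.length → 0 < vsm.getD i 0 → i < idteks.length
instance (vsm : List Int) (idteks : List Int) : Decidable (Pre_get_result_order vsm idteks) := by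
  unfold Pre_get_result_order; infer_instance
def pvWitness_get_result_order : List Int × List Int := ([1, -2, 3], [10, 20, 30])

def Spec_get_result_order (vsm : List Int) (idteks : List Int) (out : List Int × String) : Prop := out = get_result_order_alt vsm idteks
instance (vsm : List Int) (idteks : List Int) (out : List Int × String) : Decidable (Spec_get_result_order vsm idteks out) := by unfold Spec_get_result_order; infer_instance

-- ===== CLAIM (what is proved, stated in full; the proofs are below) =====
def Claim_equal_get_result_order : Prop := ∀ (vsm : List Int) (idteks : List Int), Dom_get_result_order vsm idteks → Pre_get_result_order vsm idteks → Spec_get_result_order vsm idteks (get_result_order vsm idteks)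

-- ===== LEMMAS AND PROOFS =====

-- insertBy puts x first when x goes before every element.
theorem insertBy_of_forall_before {α : Type} (before : α → α → Bool) (x : α) (ys : List α)
    (h : ∀ y ∈ ys, before x y = true) : PySem.List.insertBy before x ys = x :: ys := by
  cases ys with
  | nil => rfl
  | cons y ys => simp [PySem.List.insertBy, h y (by simp)]

-- insertBy with the reverse comparator preserves the descending-pairwise invariant.
theorem pairwise_insertBy {α : Type} (key : α → Int) (x : α) (ys : List α)
    (h : ys.Pairwise (fun a b => key b ≤ key a)) :
    (PySem.List.insertBy (fun a b => decide (key b < key a)) x ys).Pairwise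
      (fun a b => key b ≤ key a) := by
  induction ys with
  | nil => simp [PySem.List.insertBy]
  | cons y ys ih =>
    rcases List.pairwise_cons.mp h with ⟨hy, hys⟩
    by_cases hxy : key y < key x
    · simp only [PySem.List.insertBy, hxy, decide_true, if_true]
      refine List.pairwise_cons.mpr ⟨?_, h⟩
      intro z hz
      rcases List.mem_cons.mp hz with rfl | hz
      · omega
      · have := hy z hz; omega
    · simp only [PySem.List.insertBy, hxy, decide_false]
      refine List.pairwise_cons.mpr ⟨?_, ih hys⟩
      intro z hz
      rcases (PySem.List.mem_insertBy _ _ _ _).mp hz with hz | hz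
      · subst hz; omega
      · exact hy z hz

-- filtering commutes with one descending insertion, given the invariant.
theorem filter_insertBy {α : Type} (key : α → Int) (p : α → Bool) (x : α) (ys : List α)
    (h : ys.Pairwise (fun a b => key b ≤ key a)) :
    (PySem.List.insertBy (fun a b => decide (key b < key a)) x ys).filter p =
      if p x then PySem.List.insertBy (fun a b => decide (key b < key a)) x (ys.filter p)
      else ys.filter p := by
  induction ys with
  | nil => cases hpx : p x <;> simp [PySem.List.insertBy, hpx]
  | cons y ys ih =>
    rcases List.pairwise_cons.mp h with ⟨hy, hys⟩
    by_cases hxy : key y < key x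
    · simp only [PySem.List.insertBy, hxy, decide_true, if_true]
      cases hpx : p x with
      | false => simp [List.filter_cons, hpx]
      | true =>
        have hall : ∀ z ∈ (y :: ys).filter p, (fun a b => decide (key b < key a)) x z = true := by
          intro z hz
          have hzmem := List.mem_of_mem_filter hz
          rcases List.mem_cons.mp hzmem with rfl | hz'
          · simp; omega
          · have := hy z hz'; simp; omega
        rw [insertBy_of_forall_before _ _ _ hall]
        simp [List.filter_cons, hpx]
    · simp only [PySem.List.insertBy, hxy, decide_false]
      cases hpx : p x with
      | false =>
        cases hpy : p y <;> simp_all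
      | true =>
        cases hpy : p y with
        | false => simp_all
        | true =>
          simp [hpy, hpx, ih hys, PySem.List.insertBy, hxy]

-- filtering commutes with the whole stable reverse sort.
theorem filter_sorted_rev {α : Type} (key : α → Int) (p : α → Bool) (xs : List α) :
    (PySem.List.sorted xs key true).filter p = PySem.List.sorted (xs.filter p) key true := by
  rw [PySem.List.sorted_rev_eq_foldl_insertBy, PySem.List.sorted_rev_eq_foldl_insertBy]
  suffices h : ∀ acc : List α, acc.Pairwise (fun a b => key b ≤ key a) →
      (xs.foldl (fun acc x => PySem.List.insertBy (fun a b => decide (key b < key a)) x acc) acc).filter p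
      = (xs.filter p).foldl (fun acc x => PySem.List.insertBy (fun a b => decide (key b < key a)) x acc) (acc.filter p) by
    simpa using h [] (by simp)
  induction xs with
  | nil => intro acc _; simp
  | cons x xs ih =>
    intro acc hacc
    simp only [List.foldl_cons, List.filter_cons]
    cases hpx : p x with
    | true =>
      rw [ih _ (pairwise_insertBy key x acc hacc), filter_insertBy key p x acc hacc, hpx]
      simp
    | false =>
      rw [ih _ (pairwise_insertBy key x acc hacc), filter_insertBy key p x acc hacc, hpx]
      simp

-- a descending-key list with no duplicate key value is determined by its per-key sublists
-- (uniqueness of the stable descending sort).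
theorem stable_desc_unique {α : Type} (key : α → Int) :
    ∀ (ys zs : List α), ys.Pairwise (fun a b => key b ≤ key a) →
      zs.Pairwise (fun a b => key b ≤ key a) →
      (∀ v : Int, ys.filter (fun x => key x == v) = zs.filter (fun x => key x == v)) →
      ys = zs := by
  intro ys
  induction ys with
  | nil =>
    intro zs _ _ hf
    cases zs with
    | nil => rfl
    | cons b zs' =>
      have := hf (key b)
      simp at this
  | cons a ys' ih =>
    intro zs hys hzs hf
    cases zs with
    | nil =>
      have := hf (key a)
      simp at this
    | cons b zs' =>
      rcases List.pairwise_cons.mp hys with ⟨hya, hys'⟩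
      rcases List.pairwise_cons.mp hzs with ⟨hzb, hzs'⟩
      have hkeq : key a = key b := by
        by_contra hne
        -- b is in ys' (first element of the key-b filter of ys), so key b ≤ key a; symmetrically.
        have h1 := hf (key b)
        have hbz : (b :: zs').filter (fun x => key x == (key b : Int)) =
            b :: zs'.filter (fun x => key x == (key b : Int)) := by
          simp
        rw [hbz] at h1
        have hbmem : b ∈ (a :: ys').filter (fun x => key x == (key b : Int)) := by
          rw [h1]; simp
        have hbys : b ∈ a :: ys' := List.mem_of_mem_filter hbmem
        have hbys' : b ∈ ys' := by
          rcases List.mem_cons.mp hbys with rfl | h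
          · exact absurd rfl hne
          · exact h
        have hba : key b ≤ key a := hya b hbys'
        have h2 := hf (key a)
        have haz : (a :: ys').filter (fun x => key x == (key a : Int)) =
            a :: ys'.filter (fun x => key x == (key a : Int)) := by
          simp
        rw [haz] at h2
        have hamem : a ∈ (b :: zs').filter (fun x => key x == (key a : Int)) := by
          rw [← h2]; simp
        have hazs : a ∈ b :: zs' := List.mem_of_mem_filter hamem
        have hazs' : a ∈ zs' := by
          rcases List.mem_cons.mp hazs with rfl | h
          · exact absurd rfl hne
          · exact h
        have hab : key a ≤ key b := hzb a hazs'
        omega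
      have hhead := hf (key a)
      rw [List.filter_cons, List.filter_cons] at hhead
      simp only [show (key a == key a) = true by simp,
        show (key b == key a) = true by simp [hkeq], if_true, List.cons.injEq] at hhead
      have htail : ∀ v : Int, ys'.filter (fun x => key x == v) = zs'.filter (fun x => key x == v) := by
        intro v
        by_cases hv : v = key a
        · subst hv
          exact hhead.2
        · have := hf v
          rw [List.filter_cons, List.filter_cons] at this
          have hna : (key a == v) = false := by simp; omega
          have hnb : (key b == v) = false := by rw [← hkeq]; exact hna
          rw [hna, hnb] at this
          simpa using this
      rw [hhead.1, ih zs' hys' hzs' htail]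

-- all elements of a bucket carry its key value.
theorem key_of_mem_bucket {α : Type} (key : α → Int) (X : List α) (v : Int) (x : α)
    (h : x ∈ X.filter (fun d => key d == v)) : key x = v := by
  have := (List.mem_filter.mp h).2
  simpa using this

-- concatenating buckets along a strictly descending key list is descending-pairwise.
theorem pairwise_flatMap_buckets {α : Type} (key : α → Int) (X : List α) :
    ∀ (L : List Int), L.Pairwise (fun a b => b < a) →
      (L.flatMap (fun v => X.filter (fun d => key d == v))).Pairwise
        (fun a b => key b ≤ key a) := by
  intro L
  induction L with
  | nil => intro _; simp
  | cons u L' ih =>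
    intro hL
    rcases List.pairwise_cons.mp hL with ⟨hu, hL'⟩
    rw [List.flatMap_cons]
    rw [List.pairwise_append]
    refine ⟨?_, ih hL', ?_⟩
    · refine List.pairwise_iff_forall_sublist.mpr ?_
      intro a b hs
      have ha := key_of_mem_bucket key X u a (hs.subset (by simp))
      have hb := key_of_mem_bucket key X u b (hs.subset (by simp))
      omega
    · intro a ha b hb
      have hka : key a = u := key_of_mem_bucket key X u a ha
      rcases List.mem_flatMap.mp hb with ⟨v, hvL, hbv⟩
      have hkb : key b = v := key_of_mem_bucket key X v b hbv
      have := hu v hvL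
      omega

-- filtering the bucket concatenation by one key value returns that bucket (or nothing).
theorem filter_flatMap_buckets {α : Type} (key : α → Int) (X : List α) (v : Int) :
    ∀ (L : List Int), L.Nodup →
      (L.flatMap (fun u => X.filter (fun d => key d == u))).filter (fun x => key x == v) =
        if v ∈ L then X.filter (fun d => key d == v) else [] := by
  intro L
  induction L with
  | nil => intro _; simp
  | cons u L' ih =>
    intro hnd
    rcases List.nodup_cons.mp hnd with ⟨hu, hnd'⟩
    rw [List.flatMap_cons, List.filter_append, ih hnd']
    by_cases huv : u = v
    · subst huv
      have h1 : (X.filter (fun d => key d == u)).filter (fun x => key x == u) =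
          X.filter (fun d => key d == u) := by
        apply List.filter_eq_self.mpr
        intro x hx
        simp [key_of_mem_bucket key X u x hx]
      rw [h1]
      simp [hu]
    · have h1 : (X.filter (fun d => key d == u)).filter (fun x => key x == v) = [] := by
        apply List.filter_eq_nil_iff.mpr
        intro x hx
        simp [key_of_mem_bucket key X u x hx, huv]
      rw [h1]
      by_cases hvL : v ∈ L' <;> simp [hvL, Ne.symm huv]

-- a bucket at a key value outside X's key image is empty.
theorem bucket_empty_of_not_mem {α : Type} (key : α → Int) (X : List α) (v : Int)
    (h : v ∉ X.map key) : X.filter (fun d => key d == v) = [] := by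
  apply List.filter_eq_nil_iff.mpr
  intro x hx hkx
  exact h (List.mem_map.mpr ⟨x, hx, by simpa using hkx⟩)

-- all keys equal ⇒ the stable reverse sort is the identity.
theorem sorted_rev_const_key {α : Type} (key : α → Int) (v : Int) (xs : List α)
    (h : ∀ x ∈ xs, key x = v) : PySem.List.sorted xs key true = xs := by
  apply PySem.List.sorted_rev_eq_self_of_pairwise
  apply List.pairwise_iff_forall_sublist.mpr
  intro a b hs
  rw [h a (hs.subset (by simp)), h b (hs.subset (by simp))]

-- MAIN: the stable descending sort of X by key is the concatenation of its buckets along the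
-- descending sort of the distinct key values.
theorem sorted_rev_eq_flatMap_buckets {α : Type} (key : α → Int) (X : List α) :
    PySem.List.sorted X key true =
      (PySem.List.sorted (PySem.Set.ofList (X.map key)) (fun v => v) true).flatMap
        (fun v => X.filter (fun d => key d == v)) := by
  set K : List Int := PySem.Set.ofList (X.map key) with hK
  set L : List Int := PySem.List.sorted K (fun v => v) true with hL
  have hKnd : K.Nodup := by rw [hK]; exact PySem.Set.nodup_ofList _
  have hLnd : L.Nodup := ((PySem.List.sorted_perm K (fun v => v) true).symm.nodup hKnd)
  have hLdesc : L.Pairwise (fun a b => b < a) := by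
    have h1 : L.Pairwise (fun a b : Int => b ≤ a) := by
      simpa using PySem.List.sorted_pairwise_rev K (fun v => v)
    have h2 : L.Pairwise (fun a b : Int => a ≠ b) := hLnd
    exact (h1.and h2).imp (by intro a b hab; omega)
  apply stable_desc_unique key
  · exact PySem.List.sorted_pairwise_rev X key
  · exact pairwise_flatMap_buckets key X L hLdesc
  · intro v
    rw [filter_sorted_rev key (fun x => key x == v) X]
    rw [sorted_rev_const_key key v _ (by
      intro x hx
      exact key_of_mem_bucket key X v x hx)]
    rw [filter_flatMap_buckets key X v L hLnd]
    by_cases hvL : v ∈ L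
    · simp [hvL]
    · rw [if_neg hvL]
      apply bucket_empty_of_not_mem key X v
      intro hvm
      refine hvL ?_
      rw [hL]
      have hvK : v ∈ K := by rw [hK]; exact (PySem.Set.mem_ofList _ _).mpr hvm
      simpa [PySem.List.mem_sorted] using hvK

-- ===== VERDICT (by name: the statement is the Claim_ definition above) =====
theorem get_result_order_spec : Claim_equal_get_result_order := by
  intro vsm idteks _ _
  unfold Spec_get_result_order get_result_order get_result_order_alt
  by_cases hvsm : vsm = []
  · subst hvsm; rfl
  simp only [hvsm, if_false]
  set key : Int → Int := fun d => PySem.List.pyGetD vsm d 0 with hkey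
  set g : Int → Int := fun d => PySem.List.pyGetD idteks d 0 with hg
  set R : List Int := PySem.List.pyRange 0 (PySem.List.len vsm) 1 with hR
  set X : List Int := R.filter (fun d => decide (0 < key d)) with hX
  -- A's list = map g over the filtered stable sort of the indices
  have hA : (PySem.List.sorted R key true).foldl
      (fun acc d => if 0 < key d then acc ++ [g d] else acc) []
      = (PySem.List.sorted X key true).map g := by
    have h1 := PySem.List.foldl_append_if (fun d => decide (0 < key d)) g
      (PySem.List.sorted R key true) []
    simp only [decide_eq_true_eq] at h1
    rw [h1, List.nil_append, filter_sorted_rev key (fun d => decide (0 < key d)) R]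
  -- B's dict: fold over the filtered indices, then over the pair list
  have hBdict : R.foldl
      (fun b d => if 0 < key d then b.modify (key d) [] (· ++ [g d]) else b)
      (PySem.Dict.empty : PySem.Dict Int (List Int))
      = (X.map (fun d => (key d, g d))).foldl
          (fun b q => b.modify q.1 [] (· ++ [q.2])) PySem.Dict.empty := by
    rw [List.foldl_map]
    have := PySem.List.foldl_ite_eq_foldl_filter (fun d => (0 : Int) < key d)
      (fun b d => PySem.Dict.modify b (key d) [] (· ++ [g d])) R
      (PySem.Dict.empty : PySem.Dict Int (List Int))
    simpa [hX] using this
  have hgetD : ∀ v : Int,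
      ((X.map (fun d => (key d, g d))).foldl
        (fun b q => b.modify q.1 [] (· ++ [q.2]))
        (PySem.Dict.empty : PySem.Dict Int (List Int))).getD v []
      = (X.filter (fun d => key d == v)).map g := by
    intro v
    rw [PySem.Dict.getD_foldl_modify_append, PySem.Dict.getD_empty, List.nil_append,
      List.filter_map, List.map_map]
    rfl
  have hkeys : ((X.map (fun d => (key d, g d))).foldl
      (fun b q => b.modify q.1 [] (· ++ [q.2]))
      (PySem.Dict.empty : PySem.Dict Int (List Int))).keys
      = PySem.Set.ofList (X.map key) := by
    rw [PySem.Dict.keys_foldl_modify_key, PySem.Dict.keys_empty,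
      PySem.Set.update_nil_left, List.map_map]
    rfl
  rw [hA, hBdict, sorted_rev_eq_flatMap_buckets key X]
  have hB : (PySem.List.sorted ((X.map (fun d => (key d, g d))).foldl
        (fun b q => b.modify q.1 [] (· ++ [q.2]))
        (PySem.Dict.empty : PySem.Dict Int (List Int))).keys (fun v => v) true).foldl
      (fun acc v => acc ++ ((X.map (fun d => (key d, g d))).foldl
        (fun b q => b.modify q.1 [] (· ++ [q.2]))
        (PySem.Dict.empty : PySem.Dict Int (List Int))).getD v []) []
      = ((PySem.List.sorted (PySem.Set.ofList (X.map key)) (fun v => v) true).flatMap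
          (fun v => X.filter (fun d => key d == v))).map g := by
    rw [PySem.List.foldl_append_eq_flatMap, List.nil_append, hkeys, List.map_flatMap]
    apply List.flatMap_congr
    intro v _
    exact hgetD v
  rw [hB]
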